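-- pv_equiv track=rewrite | github.com/Nevvyboi/GroundZero | reasoning/advanced_reasoning.py | _find_relevant_facts
-- ===== SOURCE A (Python) =====
-- from typing import List, Dict, Any, Optional, Tuple
--
-- def _find_relevant_facts(concepts: List[str], context: List[str]) -> List[str]:
--     """Find facts relevant to concepts"""
--     relevant = []
--     for fact in context:
--         fact_lower = fact.lower()
--         relevance = sum(1 for c in concepts if c in fact_lower)
--         if relevance > 0:
--             relevant.append((fact, relevance))
--
--     # Sort by relevance
--     relevant.sort(key=lambda x: x[1], reverse=True)
--     return [f[0] for f in relevant]
-- ===== SOURCE B (Python) =====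
-- from typing import List
--
-- def _find_relevant_facts(concepts: List[str], context: List[str]) -> List[str]:
--     """Find facts relevant to concepts (bucket/counting sort by relevance)."""
--     buckets = {}
--     for fact in context:
--         fact_lower = fact.lower()
--         relevance = sum(1 for c in concepts if c in fact_lower)
--         if relevance > 0:
--             buckets.setdefault(relevance, []).append(fact)
--     result = []
--     for count in range(len(concepts), 0, -1):
--         result.extend(buckets.get(count, []))
--     return result
-- ===== Notes on version B (the rewrite author's own statement) =====
-- stated objective: alternative
-- what changed: Replaces building (fact, count) tuples plus a stable comparison sort with a bucket/counting sort: facts are appended in original order to a dict of buckets keyed by relevance count, and the result is emitted by walking counts from len(concepts) down to 1.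
import Mathlib
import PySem

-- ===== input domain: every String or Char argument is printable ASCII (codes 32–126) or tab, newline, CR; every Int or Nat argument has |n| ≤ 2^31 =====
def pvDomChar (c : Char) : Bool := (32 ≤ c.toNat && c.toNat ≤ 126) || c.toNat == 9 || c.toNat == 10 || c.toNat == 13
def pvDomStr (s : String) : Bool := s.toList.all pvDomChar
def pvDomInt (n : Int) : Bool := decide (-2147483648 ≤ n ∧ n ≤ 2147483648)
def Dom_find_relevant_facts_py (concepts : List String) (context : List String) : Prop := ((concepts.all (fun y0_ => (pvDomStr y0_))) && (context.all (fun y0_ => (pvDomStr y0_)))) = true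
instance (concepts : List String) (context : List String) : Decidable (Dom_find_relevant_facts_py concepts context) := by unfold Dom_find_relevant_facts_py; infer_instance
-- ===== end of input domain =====

-- B replaces the stable comparison sort on (fact, count) tuples by a bucket/counting
-- sort keyed by relevance count (alternative decomposition; same results).

-- ===== PORT A =====
-- shared helper: 'sum(1 for c in concepts if c in fact_lower)' (identical line in A and B)
def pvRelCount (concepts : List String) (factLower : String) : Int :=
  concepts.foldl (fun acc c => if PySem.Str.isIn c factLower then acc + 1 else acc) 0

def find_relevant_facts_py (concepts : List String) (context : List String) : List String :=
  let relevant : List (String × Int) :=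
    context.foldl (fun acc fact =>
      let factLower := PySem.Str.lower fact
      let relevance := pvRelCount concepts factLower
      if 0 < relevance then acc ++ [(fact, relevance)] else acc) []
  let sortedRel := PySem.List.sorted relevant (fun x => x.2) true
  sortedRel.map (fun f => f.1)

-- ===== PORT B =====
def find_relevant_facts_py_alt (concepts : List String) (context : List String) : List String :=
  let buckets : PySem.Dict Int (List String) :=
    context.foldl (fun d fact =>
      let factLower := PySem.Str.lower fact
      let relevance := pvRelCount concepts factLower
      if 0 < relevance then d.modify relevance [] (· ++ [fact]) else d) PySem.Dict.empty
  (PySem.List.pyRange (concepts.length : Int) 0 (-1)).foldl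
    (fun result count => result ++ buckets.getD count []) []

-- ===== PRECONDITION & SPEC =====
def Spec_find_relevant_facts_py (concepts : List String) (context : List String) (out : List String) : Prop := out = find_relevant_facts_py_alt concepts context
instance (concepts : List String) (context : List String) (out : List String) : Decidable (Spec_find_relevant_facts_py concepts context out) := by unfold Spec_find_relevant_facts_py; infer_instance

-- ===== CLAIM (what is proved, stated in full; the proofs are below) =====
def Claim_equal_find_relevant_facts_py : Prop := ∀ (concepts : List String) (context : List String), Dom_find_relevant_facts_py concepts context → Spec_find_relevant_facts_py concepts context (find_relevant_facts_py concepts context)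

-- ===== LEMMAS AND PROOFS =====

-- bounds on the relevance count
theorem pvRelCount_bounds (concepts : List String) (s : String) :
    0 ≤ pvRelCount concepts s ∧ pvRelCount concepts s ≤ concepts.length := by
  unfold pvRelCount
  suffices h : ∀ (l : List String) (a : Int),
      a ≤ l.foldl (fun acc c => if PySem.Str.isIn c s then acc + 1 else acc) a ∧
      l.foldl (fun acc c => if PySem.Str.isIn c s then acc + 1 else acc) a ≤ a + l.length by
    have := h concepts 0; omega
  intro l
  induction l with
  | nil => intro a; simp
  | cons c t ih =>
    intro a
    have h1 := ih (a + 1)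
    have h2 := ih a
    simp only [List.foldl_cons, List.length_cons]
    split_ifs <;> omega

-- insertBy walks past a prefix on which the predicate is false
theorem insertBy_append_not_before {α : Type} (before : α → α → Bool) (x : α)
    (A B : List α) (h : ∀ y ∈ A, before x y = false) :
    PySem.List.insertBy before x (A ++ B) = A ++ PySem.List.insertBy before x B := by
  induction A with
  | nil => simp
  | cons a t ih =>
    have ha : before x a = false := h a (by simp)
    simp only [List.cons_append, PySem.List.insertBy, ha, Bool.false_eq_true, if_false]
    rw [ih (fun y hy => h y (by simp [hy]))]

-- insertBy places x at the front when the predicate holds on every element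
theorem insertBy_all_before {α : Type} (before : α → α → Bool) (x : α)
    (B : List α) (h : ∀ y ∈ B, before x y = true) :
    PySem.List.insertBy before x B = x :: B := by
  cases B with
  | nil => rfl
  | cons b t => simp [PySem.List.insertBy, h b (by simp)]

-- the bucket concatenation of a pair list over a list of counts
def pvBuck (cs : List Int) (ys : List (String × Int)) : List (String × Int) :=
  cs.flatMap (fun c => ys.filter (fun p => p.2 == c))

theorem pvBuck_nil (cs : List Int) : pvBuck cs [] = [] := by
  simp [pvBuck]

-- inserting one element with key in cs appends it to its bucket
theorem insertBy_pvBuck (cs : List Int) (x : String × Int) (ys : List (String × Int))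
    (hcs : cs.Pairwise (fun a b => b < a)) (hx : x.2 ∈ cs) :
    PySem.List.insertBy (fun a b => decide (b.2 < a.2)) x (pvBuck cs ys) =
      pvBuck cs (ys ++ [x]) := by
  induction cs with
  | nil => simp at hx
  | cons c cs' ih =>
    have hlt : ∀ d ∈ cs', d < c := by
      intro d hd; exact (List.pairwise_cons.mp hcs).1 d hd
    have hcs' : cs'.Pairwise (fun a b => b < a) := (List.pairwise_cons.mp hcs).2
    have hsplit : ∀ (zs : List (String × Int)), pvBuck (c :: cs') zs =
        zs.filter (fun p => p.2 == c) ++ pvBuck cs' zs := by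
      intro zs; simp [pvBuck]
    rw [hsplit ys, hsplit (ys ++ [x])]
    by_cases hxc : x.2 = c
    · -- x goes at the end of bucket c
      have hfalse : ∀ y ∈ ys.filter (fun p => p.2 == c),
          (decide (y.2 < x.2) : Bool) = false := by
        intro y hy
        have : y.2 = c := by
          have := List.of_mem_filter hy; simpa using this
        simp [this, hxc]
      rw [insertBy_append_not_before _ _ _ _ hfalse]
      have htrue : ∀ y ∈ pvBuck cs' ys, (decide (y.2 < x.2) : Bool) = true := by
        intro y hy
        simp only [pvBuck, List.mem_flatMap] at hy
        obtain ⟨d, hd, hyf⟩ := hy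
        have : y.2 = d := by have := List.of_mem_filter hyf; simpa using this
        simp only [decide_eq_true_iff, this, hxc]
        exact hlt d hd
      rw [insertBy_all_before _ _ _ htrue]
      have hx2 : (fun p : String × Int => p.2 == c) x = true := by simp [hxc]
      have hnot : x.2 ∉ cs' := by
        intro hmem; have := hlt _ hmem; omega
      have hb' : pvBuck cs' (ys ++ [x]) = pvBuck cs' ys := by
        simp only [pvBuck]
        apply List.flatMap_congr
        intro d hd
        have : (fun p : String × Int => p.2 == d) x = false := by
          simp only [beq_eq_false_iff_ne, ne_eq]
          intro h; exact hnot (h ▸ hd)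
        simp [List.filter_append, this]
      rw [hb', List.filter_append]
      simp [hx2]
    · -- x belongs to a later bucket
      have hx' : x.2 ∈ cs' := by
        rcases List.mem_cons.mp hx with h | h
        · exact absurd h hxc
        · exact h
      have hfalse : ∀ y ∈ ys.filter (fun p => p.2 == c),
          (decide (y.2 < x.2) : Bool) = false := by
        intro y hy
        have hyc : y.2 = c := by have := List.of_mem_filter hy; simpa using this
        have : x.2 < c := hlt _ hx'
        simp only [decide_eq_false_iff_not, hyc, not_lt]
        omega
      rw [insertBy_append_not_before _ _ _ _ hfalse, ih hcs' hx']
      have : (fun p : String × Int => p.2 == c) x = false := by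
        simp [hxc]
      simp [List.filter_append, this]

-- the whole insertion-sort fold produces the bucket concatenation
theorem foldl_insertBy_pvBuck (cs : List Int) (xs ys : List (String × Int))
    (hcs : cs.Pairwise (fun a b => b < a)) (hxs : ∀ p ∈ xs, p.2 ∈ cs) :
    xs.foldl (fun acc x => PySem.List.insertBy (fun a b => decide (b.2 < a.2)) x acc)
      (pvBuck cs ys) = pvBuck cs (ys ++ xs) := by
  induction xs generalizing ys with
  | nil => simp
  | cons x t ih =>
    simp only [List.foldl_cons]
    rw [insertBy_pvBuck cs x ys hcs (hxs x (by simp))]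
    rw [ih (ys ++ [x]) (fun p hp => hxs p (by simp [hp]))]
    simp

-- the descending count range is strictly descending
theorem pyRange_neg_one_pairwise (a b : Int) :
    (PySem.List.pyRange a b (-1)).Pairwise (fun x y => y < x) := by
  rw [PySem.List.pyRange_neg_one_eq_reverse]
  rw [List.pairwise_reverse]
  exact PySem.List.pairwise_lt_pyRange_one _ _

-- a descending fold of appends is a flatMap
theorem descending_sort_eq_buck (concepts : List String) (xs : List (String × Int))
    (hxs : ∀ p ∈ xs, 0 < p.2 ∧ p.2 ≤ (concepts.length : Int)) :
    PySem.List.sorted xs (fun p => p.2) true =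
      pvBuck (PySem.List.pyRange (concepts.length : Int) 0 (-1)) xs := by
  rw [PySem.List.sorted_rev_eq_foldl_insertBy]
  have h := foldl_insertBy_pvBuck (PySem.List.pyRange (concepts.length : Int) 0 (-1)) xs []
    (pyRange_neg_one_pairwise _ _)
    (by
      intro p hp
      rw [PySem.List.mem_pyRange_neg_one]
      exact ⟨(hxs p hp).1, (hxs p hp).2⟩)
  rw [pvBuck_nil] at h
  simpa using h

-- ===== VERDICT (by name: the statement is the Claim_ definition above) =====
theorem find_relevant_facts_py_spec : Claim_equal_find_relevant_facts_py := by
  intro concepts context _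
  unfold Spec_find_relevant_facts_py find_relevant_facts_py find_relevant_facts_py_alt
  simp only []
  set rel : String → Int := fun f => pvRelCount concepts (PySem.Str.lower f) with hrel
  -- A's accumulation loop is filter-then-map
  have hA : context.foldl (fun acc fact =>
      let factLower := PySem.Str.lower fact
      let relevance := pvRelCount concepts factLower
      if 0 < relevance then acc ++ [(fact, relevance)] else acc) [] =
      (context.filter (fun f => decide (0 < rel f))).map (fun f => (f, rel f)) := by
    have := PySem.List.foldl_append_ite (l := context) (acc := [])
      (p := fun f => 0 < rel f) (f := fun f => (f, rel f))
    simpa using this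
  rw [hA]
  -- B's bucket loop, then its emission loop
  have hB : context.foldl (fun d fact =>
      let factLower := PySem.Str.lower fact
      let relevance := pvRelCount concepts factLower
      if 0 < relevance then d.modify relevance [] (· ++ [fact]) else d) PySem.Dict.empty =
      ((context.filter (fun f => decide (0 < rel f))).map (fun f => (rel f, f))).foldl
        (fun d p => d.modify p.1 [] (· ++ [p.2])) PySem.Dict.empty := by
    rw [List.foldl_map]
    have := PySem.List.foldl_ite_eq_foldl_filter (l := context)
      (p := fun f => 0 < rel f)
      (f := fun d f => PySem.Dict.modify d (rel f) [] (· ++ [f]))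
      (init := (PySem.Dict.empty : PySem.Dict Int (List String)))
    simpa using this
  rw [hB]
  set kept := context.filter (fun f => decide (0 < rel f)) with hkept
  have hkmem : ∀ f ∈ kept, 0 < rel f ∧ rel f ≤ (concepts.length : Int) := by
    intro f hf
    have h1 : 0 < rel f := by
      have := List.of_mem_filter hf; simpa using this
    have h2 := pvRelCount_bounds concepts (PySem.Str.lower f)
    exact ⟨h1, h2.2⟩
  -- A side: sorted = buckets
  rw [descending_sort_eq_buck concepts (kept.map (fun f => (f, rel f)))
    (by intro p hp; simp only [List.mem_map] at hp
        obtain ⟨f, hf, rfl⟩ := hp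
        exact hkmem f hf)]
  -- B side: the emission fold is a flatMap over bucket lookups
  rw [PySem.List.foldl_append_eq_flatMap]
  simp only [List.nil_append]
  -- both sides are flatMaps over the same count range; compare bucketwise
  unfold pvBuck
  rw [List.map_flatMap]
  apply List.flatMap_congr
  intro c _
  -- A's bucket, projected to facts
  have hAb : ((kept.map (fun f => (f, rel f))).filter (fun p => p.2 == c)).map
      (fun p => p.1) = kept.filter (fun f => rel f == c) := by
    rw [List.filter_map, List.map_map]
    simp [Function.comp_def]
  -- B's bucket lookup
  have hBb : (((kept.map (fun f => (rel f, f))).foldl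
      (fun d p => d.modify p.1 [] (· ++ [p.2])) PySem.Dict.empty).getD c []) =
      kept.filter (fun f => rel f == c) := by
    rw [PySem.Dict.getD_foldl_modify_append]
    rw [List.filter_map, List.map_map]
    simp [Function.comp_def, PySem.Dict.getD_empty]
  rw [hAb, hBb]
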